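-- pv_equiv track=rewrite | github.com/allenschmaltz/word_ordering_at_scale | code/data/generate_ngram_overlap_between_source_and_training.py | get_ngram_count_string
-- ===== SOURCE A (Python) =====
-- PAD_SYM = "$$PAD$$"
--
-- def collect_ngrams_for_sentence(ngram_dict, ngram_size, line_tokens):
--     for i in range(0, len(line_tokens)-(ngram_size-1)):
--         ngram = line_tokens[i:i+ngram_size]
--         assert len(ngram) == ngram_size
--         ngram = " ".join(ngram)
--         if ngram in ngram_dict:
--             ngram_dict[ngram] += 1
--         else:
--             ngram_dict[ngram] = 1
--     return ngram_dict
--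
-- def get_ngram_count_string(line_tokens, train_ngram_dict, ngram_size):
--     _source_ngrams = collect_ngrams_for_sentence({}, ngram_size,
--                                                  [PAD_SYM] * (ngram_size - 1) + line_tokens + [PAD_SYM] * (
--                                                  ngram_size - 1))
--     ngram_total_count = 0
--     ngram_covered_count = 0  # count of ngrams appearing in the training sentences
--     for ngram in _source_ngrams:
--         ngram_count = _source_ngrams[ngram]
--         ngram_total_count += ngram_count
--         if ngram in train_ngram_dict:
--             ngram_covered_count += ngram_count
--     return f"{ngram_total_count}\t{ngram_covered_count}"
-- ===== SOURCE B (Python) =====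
-- PAD_SYM = "$$PAD$$"
--
-- def get_ngram_count_string(line_tokens, train_ngram_dict, ngram_size):
--     # single fused pass: each window contributes 1; no intermediate count dict
--     padded = [PAD_SYM] * (ngram_size - 1) + line_tokens + [PAD_SYM] * (ngram_size - 1)
--     ngram_total_count = 0
--     ngram_covered_count = 0
--     for i in range(len(padded) - ngram_size + 1):
--         ngram = " ".join(padded[i:i + ngram_size])
--         ngram_total_count += 1
--         if ngram in train_ngram_dict:
--             ngram_covered_count += 1
--     return f"{ngram_total_count}\t{ngram_covered_count}"
-- ===== Notes on version B (the rewrite author's own statement) =====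
-- stated objective: simpler
-- what changed: Replaces A's two-phase scheme (build an ngram->count dict over the padded windows, then iterate the dict summing counts) with one fused pass over the windows maintaining only two integer counters and no collection at all.
import Mathlib
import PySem

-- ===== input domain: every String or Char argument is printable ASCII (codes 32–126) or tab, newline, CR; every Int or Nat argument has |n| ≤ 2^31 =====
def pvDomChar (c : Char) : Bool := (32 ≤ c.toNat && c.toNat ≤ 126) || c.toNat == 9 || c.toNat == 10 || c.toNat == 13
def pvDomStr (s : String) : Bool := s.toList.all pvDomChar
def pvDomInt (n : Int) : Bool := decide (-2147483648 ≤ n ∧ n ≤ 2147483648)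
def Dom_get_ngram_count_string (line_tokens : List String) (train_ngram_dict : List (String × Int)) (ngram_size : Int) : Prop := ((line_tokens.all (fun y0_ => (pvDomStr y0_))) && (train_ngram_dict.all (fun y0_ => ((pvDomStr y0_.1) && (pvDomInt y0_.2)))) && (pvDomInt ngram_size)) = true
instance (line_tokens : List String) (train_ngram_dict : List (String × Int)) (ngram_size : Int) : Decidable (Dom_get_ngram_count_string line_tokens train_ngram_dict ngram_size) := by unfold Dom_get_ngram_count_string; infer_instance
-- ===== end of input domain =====

-- B replaces A's two-phase scheme (build an ngram→count dict, then iterate it summing counts)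
-- with one fused pass over the windows keeping only two integer counters (objective: simpler).

-- ===== PORT A =====
-- the Python assert 'len(ngram) == ngram_size' always holds when ngram_size ≥ 0 (guaranteed by
-- Pre_) and always fails otherwise; it is therefore not modelled in the port
def collect_ngrams_for_sentence (ngram_dict : PySem.Dict String Int) (ngram_size : Int) (line_tokens : List String) : PySem.Dict String Int :=
  (PySem.List.pyRange 0 (PySem.List.len line_tokens - (ngram_size - 1)) 1).foldl
    (fun d i =>
      let ngram := PySem.Str.join " " (PySem.List.slice line_tokens (some i) (some (i + ngram_size)))
      if d.contains ngram then d.insert ngram (d.getD ngram 0 + 1) else d.insert ngram 1)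
    ngram_dict

def get_ngram_count_string (line_tokens : List String) (train_ngram_dict : List (String × Int)) (ngram_size : Int) : String :=
  let src := collect_ngrams_for_sentence PySem.Dict.empty ngram_size
      (List.replicate (ngram_size - 1).toNat "$$PAD$$" ++ line_tokens ++ List.replicate (ngram_size - 1).toNat "$$PAD$$")
  let res := src.keys.foldl
    (fun (tc : Int × Int) ngram =>
      let ngram_count := src.getD ngram 0
      (tc.1 + ngram_count,
       if train_ngram_dict.any (fun p => p.1 == ngram) then tc.2 + ngram_count else tc.2))
    (0, 0)
  PySem.Int.toStr res.1 ++ "\t" ++ PySem.Int.toStr res.2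

-- ===== PORT B =====
def get_ngram_count_string_alt (line_tokens : List String) (train_ngram_dict : List (String × Int)) (ngram_size : Int) : String :=
  let padded := List.replicate (ngram_size - 1).toNat "$$PAD$$" ++ line_tokens ++ List.replicate (ngram_size - 1).toNat "$$PAD$$"
  let res := (PySem.List.pyRange 0 (PySem.List.len padded - ngram_size + 1) 1).foldl
    (fun (tc : Int × Int) i =>
      let ngram := PySem.Str.join " " (PySem.List.slice padded (some i) (some (i + ngram_size)))
      (tc.1 + 1,
       if train_ngram_dict.any (fun p => p.1 == ngram) then tc.2 + 1 else tc.2))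
    (0, 0)
  PySem.Int.toStr res.1 ++ "\t" ++ PySem.Int.toStr res.2

-- ===== PRECONDITION & SPEC =====
-- Pre_ excludes exactly ngram_size < 0, where Python A raises AssertionError on every input
def Pre_get_ngram_count_string (line_tokens : List String) (train_ngram_dict : List (String × Int)) (ngram_size : Int) : Prop := 0 ≤ ngram_size
instance (line_tokens : List String) (train_ngram_dict : List (String × Int)) (ngram_size : Int) : Decidable (Pre_get_ngram_count_string line_tokens train_ngram_dict ngram_size) := by unfold Pre_get_ngram_count_string; infer_instance
def pvWitness_get_ngram_count_string : List String × (List (String × Int)) × Int := (["a", "b", "a"], [("a b", 1), ("$$PAD$$ a", 3)], 2)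

def Spec_get_ngram_count_string (line_tokens : List String) (train_ngram_dict : List (String × Int)) (ngram_size : Int) (out : String) : Prop := out = get_ngram_count_string_alt line_tokens train_ngram_dict ngram_size
instance (line_tokens : List String) (train_ngram_dict : List (String × Int)) (ngram_size : Int) (out : String) : Decidable (Spec_get_ngram_count_string line_tokens train_ngram_dict ngram_size out) := by unfold Spec_get_ngram_count_string; infer_instance

-- ===== CLAIM (what is proved, stated in full; the proofs are below) =====
def Claim_equal_get_ngram_count_string : Prop := ∀ (line_tokens : List String) (train_ngram_dict : List (String × Int)) (ngram_size : Int), Dom_get_ngram_count_string line_tokens train_ngram_dict ngram_size → Pre_get_ngram_count_string line_tokens train_ngram_dict ngram_size → Spec_get_ngram_count_string line_tokens train_ngram_dict ngram_size (get_ngram_count_string line_tokens train_ngram_dict ngram_size)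

-- ===== LEMMAS AND PROOFS =====

-- sum, over the distinct elements of ws, of (count in ws, filtered by P) = countP P ws
theorem pv_sum_ofList_count (ws : List String) (P : String → Bool) :
    ((PySem.Set.ofList ws).map (fun k => if P k = true then (ws.count k : Int) else 0)).sum
    = (ws.countP P : Int) := by
  have hnd := PySem.Set.nodup_ofList ws
  have hto : (PySem.Set.ofList ws : List String).toFinset = ws.toFinset := by
    ext a; simp [List.mem_toFinset, PySem.Set.mem_ofList]
  rw [← List.sum_toFinset _ hnd, hto]
  have h1 : ∀ a ∈ ws.toFinset, (if P a = true then (ws.count a : Int) else 0) = ((ws.filter P).count a : Int) := by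
    intro a _
    by_cases h : P a = true
    · simp [h, List.count_filter h]
    · have hm : a ∉ ws.filter P := fun hm => h (List.of_mem_filter hm)
      simp [h, List.count_eq_zero.mpr hm]
  rw [Finset.sum_congr rfl h1]
  have hsub : (ws.filter P).toFinset ⊆ ws.toFinset := by
    intro a ha; simp only [List.mem_toFinset] at *; exact List.mem_of_mem_filter ha
  have hzero : ∀ a ∈ ws.toFinset, a ∉ (ws.filter P).toFinset → ((ws.filter P).count a : Int) = 0 := by
    intro a _ ha; simp only [List.mem_toFinset] at ha
    simp [List.count_eq_zero.mpr ha]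
  rw [← Finset.sum_subset hsub hzero]
  rw [show ∀ s : Finset String, ∑ a ∈ s, ((ws.filter P).count a : Int) = ((∑ a ∈ s, (ws.filter P).count a : Nat) : Int) from fun s => by push_cast; rfl]
  rw [List.sum_toFinset_count_eq_length, List.countP_eq_length_filter]

-- special case P ≡ true: sum over distinct elements of counts = length
theorem pv_sum_ofList_count_total (ws : List String) :
    ((PySem.Set.ofList ws).map (fun k => (ws.count k : Int))).sum = (ws.length : Int) := by
  have h := pv_sum_ofList_count ws (fun _ => true)
  simpa using h

-- the core equality of the two accumulations, over an arbitrary padded token list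
theorem pv_core (padded : List String) (td : List (String × Int)) (n : Int) :
    ((collect_ngrams_for_sentence PySem.Dict.empty n padded).keys.foldl
      (fun (tc : Int × Int) ngram =>
        (tc.1 + (collect_ngrams_for_sentence PySem.Dict.empty n padded).getD ngram 0,
         if td.any (fun p => p.1 == ngram) then tc.2 + (collect_ngrams_for_sentence PySem.Dict.empty n padded).getD ngram 0 else tc.2)) (0, 0))
    = ((PySem.List.pyRange 0 (PySem.List.len padded - n + 1) 1).foldl
      (fun (tc : Int × Int) i =>
        (tc.1 + 1, if td.any (fun p => p.1 == PySem.Str.join " " (PySem.List.slice padded (some i) (some (i + n)))) then tc.2 + 1 else tc.2)) (0, 0)) := by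
  have hN : PySem.List.len padded - (n - 1) = PySem.List.len padded - n + 1 := by ring
  set w : Int → String := fun i => PySem.Str.join " " (PySem.List.slice padded (some i) (some (i + n))) with hw
  set r : List Int := PySem.List.pyRange 0 (PySem.List.len padded - n + 1) 1 with hr
  set ws : List String := r.map w with hws
  set P : String → Bool := fun s => td.any (fun p => p.1 == s) with hP
  -- Phase 1 of A builds Counter(ws)
  have hcollect : collect_ngrams_for_sentence PySem.Dict.empty n padded = PySem.Dict.counter ws := by
    unfold collect_ngrams_for_sentence
    rw [hN, ← hr]
    have hbody : (fun (d : PySem.Dict String Int) i =>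
        let ngram := w i
        if d.contains ngram then d.insert ngram (d.getD ngram 0 + 1) else d.insert ngram 1)
        = fun d i => (fun (d : PySem.Dict String Int) x => d.insert x (d.getD x 0 + 1)) d (w i) := by
      funext d i
      by_cases h : d.contains (w i) = true
      · simp [h]
      · simp only [Bool.not_eq_true] at h
        simp [h, PySem.Dict.getD_of_not_contains _ _ h]
    rw [hbody, ← List.foldl_map (f := w) (g := fun (d : PySem.Dict String Int) x => d.insert x (d.getD x 0 + 1)), ← hws, PySem.Dict.foldl_insert_getD_add_one_eq_counter]
  -- left side: fold over the counter's keys = sums of counts over the distinct ngrams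
  rw [hcollect]
  simp only [PySem.Dict.keys_counter, PySem.Dict.getD_counter]
  rw [PySem.List.foldl_prod_mk (f := fun (s : Int) k => s + (ws.count k : Int))
      (g := fun (s : Int) k => if P k then s + (ws.count k : Int) else s)]
  rw [PySem.List.foldl_add]
  have hg : (fun (s : Int) k => if P k = true then s + (ws.count k : Int) else s)
      = fun s k => s + (if P k = true then (ws.count k : Int) else 0) := by
    funext s k; split_ifs <;> simp
  rw [hg, PySem.List.foldl_add]
  rw [pv_sum_ofList_count_total, pv_sum_ofList_count]
  -- right side: fold over windows directly
  rw [show (fun (tc : Int × Int) i =>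
        let ngram := w i
        (tc.1 + 1, if P ngram then tc.2 + 1 else tc.2))
      = fun (tc : Int × Int) i => (fun (tc : Int × Int) (x : String) =>
        (tc.1 + 1, if P x then tc.2 + 1 else tc.2)) tc (w i) from rfl]
  rw [← List.foldl_map (f := w) (g := fun (tc : Int × Int) (x : String) => (tc.1 + 1, if P x then tc.2 + 1 else tc.2)), ← hws]
  rw [PySem.List.foldl_prod_mk (f := fun (s : Int) (_ : String) => s + 1)
      (g := fun (s : Int) x => if P x then s + 1 else s)]
  rw [PySem.List.foldl_add (g := fun (_ : String) => (1 : Int))]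
  have hg2 : (fun (s : Int) x => if P x = true then s + 1 else s)
      = fun (s : Int) x => s + (if P x = true then (1 : Int) else 0) := by
    funext s k; split_ifs <;> simp
  rw [hg2, PySem.List.foldl_add, PySem.List.sum_map_const_int, PySem.List.sum_map_ite_one_zero]
  simp

-- ===== VERDICT (by name: the statement is the Claim_ definition above) =====
theorem get_ngram_count_string_spec : Claim_equal_get_ngram_count_string := by
  intro line_tokens train_ngram_dict ngram_size _ _
  unfold Spec_get_ngram_count_string get_ngram_count_string get_ngram_count_string_alt
  dsimp only
  rw [pv_core]
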